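-- pv_equiv track=rewrite | github.com/FreakingPotato/AutoResearch_Diffusion_Model | prepare.py | tokenize_sequence
-- ===== SOURCE A (Python) =====
-- KMER_SIZE = 6
--
-- DNA_ALPHABET = "ACGT"
--
-- SPECIAL_TOKENS = {"<PAD>": 0, "<MASK>": 1, "<UNK>": 2, "<CLS>": 3}
--
-- def tokenize_sequence(seq, vocab, k=KMER_SIZE):
--     """Tokenize a DNA sequence into k-mer IDs. Unknown chars → UNK."""
--     unk_id = SPECIAL_TOKENS["<UNK>"]
--     tokens = []
--     seq = seq.upper()
--     for i in range(len(seq) - k + 1):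
--         kmer = seq[i:i+k]
--         # Skip kmers with N or other ambiguous bases
--         if all(c in DNA_ALPHABET for c in kmer):
--             tokens.append(vocab.get(kmer, unk_id))
--         else:
--             tokens.append(unk_id)
--     return tokens
-- ===== SOURCE B (Python) =====
-- KMER_SIZE = 6
--
-- DNA_ALPHABET = "ACGT"
--
-- SPECIAL_TOKENS = {"<PAD>": 0, "<MASK>": 1, "<UNK>": 2, "<CLS>": 3}
--
-- def tokenize_sequence(seq, vocab, k=KMER_SIZE):
--     """Tokenize a DNA sequence into k-mer IDs. Unknown chars -> UNK."""
--     unk_id = SPECIAL_TOKENS["<UNK>"]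
--     seq = seq.upper()
--     # prefix sums: bad[j] = number of non-ACGT characters in seq[:j]
--     bad = [0]
--     for c in seq:
--         bad.append(bad[-1] + (c not in DNA_ALPHABET))
--     tokens = []
--     for i in range(len(seq) - k + 1):
--         if bad[i + k] - bad[i] == 0:
--             tokens.append(vocab.get(seq[i:i+k], unk_id))
--         else:
--             tokens.append(unk_id)
--     return tokens
-- ===== Notes on version B (the rewrite author's own statement) =====
-- stated objective: faster
-- what changed: Replaces the per-window all() re-scan of each k-mer with a one-pass prefix-sum array of non-ACGT character counts, so each window's ambiguity test is a constant-time subtraction.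
-- outside the precondition, e.g. on tokenize_sequence('AC', {}, -1): A returns [2, 2, 2, 2], B raises IndexError
import Mathlib
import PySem

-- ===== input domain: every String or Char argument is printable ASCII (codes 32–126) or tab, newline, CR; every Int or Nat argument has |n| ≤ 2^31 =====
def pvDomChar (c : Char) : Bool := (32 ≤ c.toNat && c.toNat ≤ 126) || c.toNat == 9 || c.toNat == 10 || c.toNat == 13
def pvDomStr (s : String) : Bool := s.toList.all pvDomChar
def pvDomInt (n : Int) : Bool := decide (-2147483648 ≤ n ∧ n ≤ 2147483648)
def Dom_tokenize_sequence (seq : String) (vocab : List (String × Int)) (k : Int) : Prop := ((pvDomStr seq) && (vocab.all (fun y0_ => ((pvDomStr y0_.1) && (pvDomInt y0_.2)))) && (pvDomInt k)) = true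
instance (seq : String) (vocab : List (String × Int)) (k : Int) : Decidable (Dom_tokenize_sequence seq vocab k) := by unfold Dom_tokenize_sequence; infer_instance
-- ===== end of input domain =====

-- B replaces A's per-window all() re-scan of every k-mer with a prefix-sum array of
-- non-ACGT counts built in one pass, deciding each window by a subtraction.

-- ===== PORT A =====
-- DNA_ALPHABET = "ACGT" (a single char 'c in DNA_ALPHABET' is char membership)
def dnaAlphabet : List Char := "ACGT".toList

-- dict.get(key, dflt) on the association list (first match)
def pyDictGetD (vocab : List (String × Int)) (key : String) (dflt : Int) : Int :=
  match vocab.find? (fun p => p.1 == key) with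
  | some p => p.2
  | none => dflt

def tokenize_sequence (seq : String) (vocab : List (String × Int)) (k : Int) : List Int :=
  let unk_id : Int := 2
  let s := PySem.Chars.upper seq.toList
  (PySem.List.pyRange 0 ((s.length : Int) - k + 1) 1).foldl
    (fun tokens i =>
      let kmer := PySem.List.slice s (some i) (some (i + k))
      if kmer.all (fun c => dnaAlphabet.contains c) then
        tokens ++ [pyDictGetD vocab (String.ofList kmer) unk_id]
      else
        tokens ++ [unk_id]) []

-- ===== PORT B =====
def tokenize_sequence_alt (seq : String) (vocab : List (String × Int)) (k : Int) : List Int :=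
  let unk_id : Int := 2
  let s := PySem.Chars.upper seq.toList
  let bad := s.foldl
    (fun b c => b ++ [PySem.List.pyGetD b (-1) 0 + (if dnaAlphabet.contains c then 0 else 1)])
    [(0 : Int)]
  (PySem.List.pyRange 0 ((s.length : Int) - k + 1) 1).foldl
    (fun tokens i =>
      if PySem.List.pyGetD bad (i + k) 0 - PySem.List.pyGetD bad i 0 = 0 then
        tokens ++ [pyDictGetD vocab (String.ofList (PySem.List.slice s (some i) (some (i + k)))) unk_id]
      else
        tokens ++ [unk_id]) []

-- ===== PRECONDITION & SPEC =====
-- Pre_ excludes k < 0, where A's window slices rely on Python's negative-slice wraparound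
-- (an accident of the implementation) and B's prefix-sum indexing raises IndexError.
def Pre_tokenize_sequence (seq : String) (vocab : List (String × Int)) (k : Int) : Prop := 0 ≤ k
instance (seq : String) (vocab : List (String × Int)) (k : Int) : Decidable (Pre_tokenize_sequence seq vocab k) := by unfold Pre_tokenize_sequence; infer_instance

def pvWitness_tokenize_sequence : String × (List (String × Int)) × Int := ("ACGTN", [("ACGT", 7)], 4)

def Spec_tokenize_sequence (seq : String) (vocab : List (String × Int)) (k : Int) (out : List Int) : Prop := out = tokenize_sequence_alt seq vocab k
instance (seq : String) (vocab : List (String × Int)) (k : Int) (out : List Int) : Decidable (Spec_tokenize_sequence seq vocab k out) := by unfold Spec_tokenize_sequence; infer_instance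

-- ===== CLAIM (what is proved, stated in full; the proofs are below) =====
def Claim_equal_tokenize_sequence : Prop := ∀ (seq : String) (vocab : List (String × Int)) (k : Int), Dom_tokenize_sequence seq vocab k → Pre_tokenize_sequence seq vocab k → Spec_tokenize_sequence seq vocab k (tokenize_sequence seq vocab k)

-- ===== LEMMAS AND PROOFS =====

-- number of non-ACGT characters among the first j characters
def badCnt (s : List Char) (j : Nat) : Nat :=
  (s.take j).countP (fun c => !dnaAlphabet.contains c)

-- the prefix-sum list B builds is the table of badCnt values
lemma badBuild (s : List Char) (acc : List Int) (x : Int) :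
    s.foldl
      (fun b c => b ++ [PySem.List.pyGetD b (-1) 0 + (if dnaAlphabet.contains c then 0 else 1)])
      (acc ++ [x])
    = acc ++ (List.range (s.length + 1)).map (fun j => x + (badCnt s j : Int)) := by
  induction s generalizing acc x with
  | nil => simp [badCnt]
  | cons c t ih =>
    simp only [List.foldl_cons, PySem.List.pyGetD_neg_one_append_singleton]
    rw [ih]
    have hm : List.map (fun j => x + ((badCnt (c :: t) j : Nat) : Int)) (List.range (t.length + 1 + 1))
        = x :: List.map
            (fun j => (x + (if dnaAlphabet.contains c then (0 : Int) else 1)) + ((badCnt t j : Nat) : Int))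
            (List.range (t.length + 1)) := by
      rw [List.range_succ_eq_map, List.map_cons, List.map_map]
      congr 1
      · simp [badCnt]
      · apply List.map_congr_left
        intro j hj
        simp only [Function.comp_apply, badCnt, List.take_succ_cons, List.countP_cons]
        by_cases h : dnaAlphabet.contains c <;> simp [h] <;> push_cast <;> ring
    rw [List.length_cons, hm]
    simp

lemma bget (s : List Char) (j : Int) (h0 : 0 ≤ j) (h1 : j ≤ (s.length : Int)) :
    PySem.List.pyGetD
      (s.foldl
        (fun b c => b ++ [PySem.List.pyGetD b (-1) 0 + (if dnaAlphabet.contains c then 0 else 1)])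
        [(0 : Int)]) j 0 = (badCnt s j.toNat : Int) := by
  have : ([] : List Int) ++ [(0 : Int)] = [(0 : Int)] := by simp
  rw [← this, badBuild]
  simp only [List.nil_append]
  rw [show j = ((j.toNat : Nat) : Int) by omega, PySem.List.pyGetD_natCast]
  have hlt : j.toNat < s.length + 1 := by omega
  simp [List.getD, hlt]
  rw [show max j 0 = j from by omega]

-- the subtraction test equals A's all() test on the window
lemma cond_eq (s : List Char) (i kk : Int) (hi : 0 ≤ i) (hk : 0 ≤ kk)
    (hik : i + kk ≤ (s.length : Int)) :
    (PySem.List.pyGetD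
        (s.foldl
          (fun b c => b ++ [PySem.List.pyGetD b (-1) 0 + (if dnaAlphabet.contains c then 0 else 1)])
          [(0 : Int)]) (i + kk) 0
      - PySem.List.pyGetD
        (s.foldl
          (fun b c => b ++ [PySem.List.pyGetD b (-1) 0 + (if dnaAlphabet.contains c then 0 else 1)])
          [(0 : Int)]) i 0 = 0)
    ↔ (PySem.List.slice s (some i) (some (i + kk))).all (fun c => dnaAlphabet.contains c) = true := by
  rw [bget s (i + kk) (by omega) hik, bget s i hi (by omega)]
  rw [PySem.List.slice_toNat s hi (by omega)]
  have htn : (i + kk).toNat = i.toNat + kk.toNat := by omega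
  unfold badCnt
  rw [htn, List.take_add, List.countP_append]
  have h2 : (i.toNat + kk.toNat) - i.toNat = kk.toNat := by omega
  rw [h2]
  constructor
  · intro h
    have hz : ((s.drop i.toNat).take kk.toNat).countP (fun c => !dnaAlphabet.contains c) = 0 := by omega
    rw [List.countP_eq_zero] at hz
    rw [List.all_eq_true]
    intro c hc
    have := hz c hc
    simpa using this
  · intro h
    have hz : ((s.drop i.toNat).take kk.toNat).countP (fun c => !dnaAlphabet.contains c) = 0 := by
      rw [List.countP_eq_zero]
      intro c hc
      rw [List.all_eq_true] at h
      simpa using h c hc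
    omega

-- ===== VERDICT (by name: the statement is the Claim_ definition above) =====
theorem tokenize_sequence_spec : Claim_equal_tokenize_sequence := by
  intro seq vocab k _ hk
  unfold Spec_tokenize_sequence tokenize_sequence tokenize_sequence_alt
  simp only []
  apply PySem.List.foldl_congr_mem
  intro tokens i hi
  rw [PySem.List.mem_pyRange_one] at hi
  have hik : i + k ≤ ((PySem.Chars.upper seq.toList).length : Int) := by omega
  have hcond := cond_eq (PySem.Chars.upper seq.toList) i k hi.1 hk hik
  by_cases h :
      (PySem.List.slice (PySem.Chars.upper seq.toList) (some i) (some (i + k))).all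
        (fun c => dnaAlphabet.contains c) = true
  · rw [if_pos h, if_pos (hcond.mpr h)]
  · rw [if_neg h, if_neg (fun hx => h (hcond.mp hx))]
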